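-- pv_equiv track=rewrite | github.com/aturnin/skillfactory_rds | module_3/func_v2.py | split_reviews
-- ===== SOURCE A (Python) =====
-- def split_reviews(x):
--     if type(x) == float:
--         x = '[[],[]]'
--     res = list()
--     x0 = x.strip('][').split('], [')
--     for rx in x0:
--         otz = rx.split('\', ')
--         for x1 in otz:
--             x1 = x1.strip('\'')
--             res.append(x1)
--
--     return res
-- ===== SOURCE B (Python) =====
-- def split_reviews(x):
--     # Single left-to-right scan splitting at either delimiter, instead of nested splits.
--     if type(x) == float:
--         x = '[[],[]]'
--     m = x.strip('][')
--     res = []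
--     cur = []
--     i = 0
--     n = len(m)
--     while i < n:
--         if m.startswith('], [', i):
--             res.append(''.join(cur).strip("'"))
--             cur = []
--             i += 4
--         elif m.startswith("', ", i):
--             res.append(''.join(cur).strip("'"))
--             cur = []
--             i += 3
--         else:
--             cur.append(m[i])
--             i += 1
--     res.append(''.join(cur).strip("'"))
--     return res
-- ===== Notes on version B (the rewrite author's own statement) =====
-- stated objective: alternative
-- what changed: A strips the brackets then runs nested splits (first on '], [', then each piece on "', ") with two levels of loops; B makes a single left-to-right scan over the stripped string, cutting a token whenever either delimiter starts at the current position, stripping quotes per token.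
import Mathlib
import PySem

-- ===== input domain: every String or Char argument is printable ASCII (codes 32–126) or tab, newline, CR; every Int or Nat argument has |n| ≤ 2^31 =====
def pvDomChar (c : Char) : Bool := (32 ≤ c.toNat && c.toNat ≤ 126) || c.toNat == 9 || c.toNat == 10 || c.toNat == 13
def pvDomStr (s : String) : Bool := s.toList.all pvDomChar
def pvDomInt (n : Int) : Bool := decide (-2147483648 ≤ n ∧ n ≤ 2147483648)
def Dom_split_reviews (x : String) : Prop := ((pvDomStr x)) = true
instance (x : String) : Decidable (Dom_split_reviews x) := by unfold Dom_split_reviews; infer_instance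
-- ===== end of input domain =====

-- B replaces A's nested split/split loops by one left-to-right scan that cuts at either
-- delimiter in a single pass (objective: alternative decomposition, same cost).

-- ===== PORT A =====
-- Python's `type(x) == float` branch can never fire for a string argument, so it is dropped.
def split_reviews (x : String) : List String :=
  let x0 := (PySem.Str.split? (PySem.Str.stripChars x "][") "], [").getD []
  x0.foldl (fun res rx =>
    ((PySem.Str.split? rx "', ").getD []).foldl
      (fun res2 x1 => res2 ++ [PySem.Str.stripChars x1 "'"]) res) []

-- ===== PORT B =====
-- the while-loop of Source B: `l` is the not-yet-scanned suffix m[i:], `cur` the pending token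
def pvScanB (l cur : List Char) : List String :=
  match l with
  | [] => [PySem.Str.stripChars (String.ofList cur.reverse) "'"]
  | c :: rest =>
    if ("], [".toList).isPrefixOf (c :: rest) then
      PySem.Str.stripChars (String.ofList cur.reverse) "'" :: pvScanB ((c :: rest).drop 4) []
    else if ("', ".toList).isPrefixOf (c :: rest) then
      PySem.Str.stripChars (String.ofList cur.reverse) "'" :: pvScanB ((c :: rest).drop 3) []
    else pvScanB rest (c :: cur)
termination_by l.length
decreasing_by all_goals (simp [List.length_drop]; try omega)

def split_reviews_alt (x : String) : List String :=
  pvScanB (PySem.Str.stripChars x "][").toList []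

-- ===== PRECONDITION & SPEC =====
def Spec_split_reviews (x : String) (out : List String) : Prop := out = split_reviews_alt x
instance (x : String) (out : List String) : Decidable (Spec_split_reviews x out) := by unfold Spec_split_reviews; infer_instance

-- ===== CLAIM (what is proved, stated in full; the proofs are below) =====
def Claim_equal_split_reviews : Prop := ∀ (x : String), Dom_split_reviews x → Spec_split_reviews x (split_reviews x)

-- ===== LEMMAS AND PROOFS =====

-- an unfueled reformulation of PySem.Chars.splitOn (used with a nonempty separator)
def pvSp (sep : List Char) (l cur : List Char) : List (List Char) :=
  match l with
  | [] => [cur.reverse]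
  | c :: rest =>
    if sep.isPrefixOf (c :: rest) ∧ sep ≠ [] then
      cur.reverse :: pvSp sep (rest.drop (sep.length - 1)) []
    else pvSp sep rest (c :: cur)
termination_by l.length
decreasing_by all_goals (simp [List.length_drop]; try omega)

-- B's scan at token (List Char) level, without the quote-stripping
def pvTok (l cur : List Char) : List (List Char) :=
  match l with
  | [] => [cur.reverse]
  | c :: rest =>
    if ("], [".toList).isPrefixOf (c :: rest) then cur.reverse :: pvTok ((c :: rest).drop 4) []
    else if ("', ".toList).isPrefixOf (c :: rest) then cur.reverse :: pvTok ((c :: rest).drop 3) []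
    else pvTok rest (c :: cur)
termination_by l.length
decreasing_by all_goals (simp [List.length_drop]; try omega)

theorem pvSp_cons_pos (sep : List Char) (c : Char) (rest cur : List Char)
    (h : sep.isPrefixOf (c :: rest) = true) (hs : sep ≠ []) :
    pvSp sep (c :: rest) cur = cur.reverse :: pvSp sep (rest.drop (sep.length - 1)) [] := by
  simp only [pvSp]; rw [if_pos ⟨h, hs⟩]

theorem pvSp_cons_neg (sep : List Char) (c : Char) (rest cur : List Char)
    (h : ¬ sep.isPrefixOf (c :: rest) = true) :
    pvSp sep (c :: rest) cur = pvSp sep rest (c :: cur) := by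
  simp only [pvSp]; rw [if_neg (fun hc => h hc.1)]

theorem pvTok_cons₁ (c : Char) (rest cur : List Char)
    (h1 : ("], [".toList).isPrefixOf (c :: rest) = true) :
    pvTok (c :: rest) cur = cur.reverse :: pvTok ((c :: rest).drop 4) [] := by
  simp only [pvTok]; rw [if_pos h1]

theorem pvTok_cons₂ (c : Char) (rest cur : List Char)
    (h1 : ¬ ("], [".toList).isPrefixOf (c :: rest) = true)
    (h2 : ("', ".toList).isPrefixOf (c :: rest) = true) :
    pvTok (c :: rest) cur = cur.reverse :: pvTok ((c :: rest).drop 3) [] := by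
  simp only [pvTok]; rw [if_neg h1, if_pos h2]

theorem pvTok_cons₃ (c : Char) (rest cur : List Char)
    (h1 : ¬ ("], [".toList).isPrefixOf (c :: rest) = true)
    (h2 : ¬ ("', ".toList).isPrefixOf (c :: rest) = true) :
    pvTok (c :: rest) cur = pvTok rest (c :: cur) := by
  simp only [pvTok]; rw [if_neg h1, if_neg h2]

theorem pvModifyHead_comp (a b : List Char) (xs : List (List Char)) :
    List.modifyHead (fun s => a ++ s) (List.modifyHead (fun s => b ++ s) xs)
      = List.modifyHead (fun s => (a ++ b) ++ s) xs := by
  cases xs <;> simp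

theorem pvModifyHead_append {α : Type} (g : α → α) (xs ys : List α) (h : xs ≠ []) :
    List.modifyHead g (xs ++ ys) = List.modifyHead g xs ++ ys := by
  cases xs
  · exact absurd rfl h
  · simp

theorem pvSp_ne_nil_aux (sep : List Char) :
    ∀ n l cur, l.length ≤ n → pvSp sep l cur ≠ [] := by
  intro n
  induction n with
  | zero => intro l cur h
            have : l = [] := by cases l <;> simp_all
            subst this; simp [pvSp]
  | succ n ih =>
    intro l cur h
    cases l with
    | nil => simp [pvSp]
    | cons c rest =>
      have hr : rest.length ≤ n := by simp at h; omega
      by_cases hp : sep.isPrefixOf (c :: rest) = true ∧ sep ≠ []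
      · simp only [pvSp]; rw [if_pos hp]; simp
      · simp only [pvSp]; rw [if_neg hp]; exact ih rest (c :: cur) hr

theorem pvSp_ne_nil (sep l cur : List Char) : pvSp sep l cur ≠ [] :=
  pvSp_ne_nil_aux sep l.length l cur le_rfl

theorem pvSp_modifyHead (sep : List Char) (hsep : sep ≠ []) :
    ∀ n l cur, l.length ≤ n →
      pvSp sep l cur = List.modifyHead (fun s => cur.reverse ++ s) (pvSp sep l []) := by
  intro n
  induction n with
  | zero => intro l cur h; have : l = [] := by cases l <;> simp_all
            subst this; simp [pvSp]
  | succ n ih =>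
    intro l cur h
    cases l with
    | nil => simp [pvSp]
    | cons c rest =>
      by_cases hp : sep.isPrefixOf (c :: rest) = true
      · rw [pvSp_cons_pos sep c rest cur hp hsep, pvSp_cons_pos sep c rest [] hp hsep]
        simp
      · have hr : rest.length ≤ n := by simp at h; omega
        rw [pvSp_cons_neg sep c rest cur hp, pvSp_cons_neg sep c rest [] hp,
            ih rest (c :: cur) hr, ih rest [c] hr, pvModifyHead_comp]
        simp

theorem pvTok_modifyHead :
    ∀ n l cur, l.length ≤ n →
      pvTok l cur = List.modifyHead (fun s => cur.reverse ++ s) (pvTok l []) := by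
  intro n
  induction n with
  | zero => intro l cur h; have : l = [] := by cases l <;> simp_all
            subst this; simp [pvTok]
  | succ n ih =>
    intro l cur h
    cases l with
    | nil => simp [pvTok]
    | cons c rest =>
      have hr : rest.length ≤ n := by simp at h; omega
      by_cases h1 : ("], [".toList).isPrefixOf (c :: rest) = true
      · rw [pvTok_cons₁ c rest cur h1, pvTok_cons₁ c rest [] h1]; simp
      · by_cases h2 : ("', ".toList).isPrefixOf (c :: rest) = true
        · rw [pvTok_cons₂ c rest cur h1 h2, pvTok_cons₂ c rest [] h1 h2]; simp
        · rw [pvTok_cons₃ c rest cur h1 h2, pvTok_cons₃ c rest [] h1 h2,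
              ih rest (c :: cur) hr, ih rest [c] hr, pvModifyHead_comp]
          simp

-- head of pvSp on empty accumulator is a prefix of the input
theorem pvSp_head_prefix (sep : List Char) (hsep : sep ≠ []) :
    ∀ n l, l.length ≤ n → (pvSp sep l []).headI <+: l := by
  intro n
  induction n with
  | zero => intro l h; have : l = [] := by cases l <;> simp_all
            subst this; simp [pvSp]
  | succ n ih =>
    intro l h
    cases l with
    | nil => simp [pvSp]
    | cons c rest =>
      have hr : rest.length ≤ n := by simp at h; omega
      by_cases hp : sep.isPrefixOf (c :: rest) = true
      · rw [pvSp_cons_pos sep c rest [] hp hsep]; simp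
      · rw [pvSp_cons_neg sep c rest [] hp,
            pvSp_modifyHead sep hsep rest.length rest [c] le_rfl]
        rcases hx : pvSp sep rest [] with _ | ⟨hh, tt⟩
        · exact absurd hx (pvSp_ne_nil sep rest [])
        · have hpre : hh <+: rest := by
            have := ih rest hr; rw [hx] at this; simpa using this
          simp only [List.modifyHead_cons, List.headI, List.reverse_cons,
            List.reverse_nil, List.nil_append, List.singleton_append]
          exact List.cons_prefix_cons.mpr ⟨rfl, hpre⟩

-- fueled go agrees with pvSp when the fuel suffices
theorem pvGo_eq (sep : List Char) (hsep : sep ≠ []) :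
    ∀ fuel l cur acc, l.length ≤ fuel →
      PySem.Chars.splitOn.go sep fuel l cur acc = acc.reverse ++ pvSp sep l cur := by
  intro fuel
  induction fuel with
  | zero =>
    intro l cur acc h
    have : l = [] := by cases l <;> simp_all
    subst this
    simp [PySem.Chars.splitOn.go, pvSp]
  | succ n ih =>
    intro l cur acc h
    cases l with
    | nil => simp [PySem.Chars.splitOn.go, pvSp]
    | cons c rest =>
      have hs : 0 < sep.length := by
        cases sep with
        | nil => exact absurd rfl hsep
        | cons a as => simp
      by_cases hp : sep.isPrefixOf (c :: rest) = true
      · simp only [PySem.Chars.splitOn.go]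
        rw [if_pos hp]
        have hdrop : List.drop sep.length (c :: rest) = rest.drop (sep.length - 1) := by
          have hk : sep.length = (sep.length - 1) + 1 := by omega
          conv_lhs => rw [hk]
          rw [List.drop_succ_cons]
        have hlen : (List.drop sep.length (c :: rest)).length ≤ n := by
          simp only [List.length_drop]
          simp at h ⊢; omega
        rw [ih _ [] (cur.reverse :: acc) hlen, pvSp_cons_pos sep c rest cur hp hsep, hdrop]
        simp
      · simp only [PySem.Chars.splitOn.go]
        rw [if_neg hp]
        have hlen : rest.length ≤ n := by simp at h; omega
        rw [ih rest (c :: cur) acc hlen, pvSp_cons_neg sep c rest cur hp]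

theorem pvSplitOn_eq (sep l : List Char) (hsep : sep ≠ []) :
    PySem.Chars.splitOn l sep = pvSp sep l [] := by
  unfold PySem.Chars.splitOn
  rw [pvGo_eq sep hsep (l.length + 1) l [] [] (by omega)]
  simp

theorem pvD1_ne : ("], [".toList : List Char) ≠ [] := by decide
theorem pvD2_ne : ("', ".toList : List Char) ≠ [] := by decide

-- MAIN: flatMap of the nested splits = B's single scan
theorem pvMain : ∀ n l, l.length ≤ n →
    (pvSp ("], [".toList) l []).flatMap (fun p => pvSp ("', ".toList) p []) = pvTok l [] := by
  intro n
  induction n with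
  | zero =>
    intro l h; have : l = [] := by cases l <;> simp_all
    subst this; simp [pvSp, pvTok]
  | succ n ih =>
    intro l h
    cases l with
    | nil => simp [pvSp, pvTok]
    | cons c rest =>
      by_cases h1 : ("], [".toList).isPrefixOf (c :: rest) = true
      · -- first delimiter: both cut here
        rw [pvSp_cons_pos _ c rest [] h1 pvD1_ne, pvTok_cons₁ c rest [] h1]
        have hd4 : ((c :: rest).drop 4) = rest.drop 3 := rfl
        have hlenD : (("], [".toList : List Char)).length - 1 = 3 := by decide
        have hlen : (rest.drop 3).length ≤ n := by
          simp only [List.length_drop]; simp at h; omega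
        rw [hd4, hlenD, List.flatMap_cons, ih (rest.drop 3) hlen]
        simp [pvSp]
      · by_cases h2 : ("', ".toList).isPrefixOf (c :: rest) = true
        · -- second delimiter: the outer split passes over it, the inner split cuts it
          obtain ⟨t, ht⟩ := List.isPrefixOf_iff_prefix.mp h2
          rw [show ("', ".toList : List Char) = ['\'', ',', ' '] from by decide] at ht
          simp only [List.cons_append, List.nil_append] at ht
          obtain ⟨h5a, h5b⟩ := List.cons.inj ht
          subst h5a
          subst h5b
          have ht' : t.length ≤ n := by simp at h; omega
          rw [pvSp_cons_neg _ _ _ _ h1,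
              pvSp_cons_neg _ _ _ _ (by
                rw [show ("], [".toList : List Char) = [']', ',', ' ', '['] from by decide]
                simp [List.isPrefixOf]),
              pvSp_cons_neg _ _ _ _ (by
                rw [show ("], [".toList : List Char) = [']', ',', ' ', '['] from by decide]
                simp [List.isPrefixOf]),
              pvSp_modifyHead _ pvD1_ne t.length t _ le_rfl]
          simp only [show ([' ', ',', '\''] : List Char).reverse = ['\'', ',', ' '] from by decide]
          rcases hx : pvSp ("], [".toList) t [] with _ | ⟨hh, tt⟩
          · exact absurd hx (pvSp_ne_nil _ t [])
          · simp only [List.modifyHead_cons, List.flatMap_cons, List.cons_append,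
              List.nil_append]
            rw [pvSp_cons_pos _ _ _ _ (by
                  rw [show ("', ".toList : List Char) = ['\'', ',', ' '] from by decide]
                  simp [List.isPrefixOf]) pvD2_ne]
            rw [show (("', ".toList : List Char)).length - 1 = 2 from by decide]
            rw [show ((',' :: ' ' :: hh : List Char).drop 2) = hh from rfl]
            rw [pvTok_cons₂ _ _ _ h1 h2]
            rw [show (('\'' :: ',' :: ' ' :: t : List Char).drop 3) = t from rfl]
            have hrest : pvSp ("', ".toList) hh [] ++ tt.flatMap (fun p => pvSp ("', ".toList) p [])
                = pvTok t [] := by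
              have hI := ih t ht'
              rw [hx] at hI
              simpa using hI
            simp only [List.reverse_nil, List.cons_append]
            rw [hrest]
        · -- ordinary character: neither split cuts at c
          have hr : rest.length ≤ n := by simp at h; omega
          rw [pvSp_cons_neg _ _ _ _ h1,
              pvSp_modifyHead _ pvD1_ne rest.length rest [c] le_rfl]
          simp only [show ∀ c : Char, ([c] : List Char).reverse = [c] from fun c => rfl]
          rcases hx : pvSp ("], [".toList) rest [] with _ | ⟨hh, tt⟩
          · exact absurd hx (pvSp_ne_nil _ rest [])
          · have hpre : hh <+: rest := by
              have := pvSp_head_prefix _ pvD1_ne rest.length rest le_rfl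
              rw [hx] at this; simpa using this
            have hnp : ¬ ("', ".toList).isPrefixOf (c :: hh) = true := by
              intro hcon
              apply h2
              rw [List.isPrefixOf_iff_prefix] at hcon ⊢
              exact hcon.trans (List.cons_prefix_cons.mpr ⟨rfl, hpre⟩)
            simp only [List.modifyHead_cons, List.flatMap_cons, List.singleton_append]
            rw [pvSp_cons_neg _ _ _ _ hnp,
                pvSp_modifyHead _ pvD2_ne hh.length hh [c] le_rfl]
            simp only [show ∀ c : Char, ([c] : List Char).reverse = [c] from fun c => rfl]
            rw [← pvModifyHead_append _ _ _ (pvSp_ne_nil ("', ".toList) hh [])]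
            have hrest : pvSp ("', ".toList) hh [] ++ tt.flatMap (fun p => pvSp ("', ".toList) p [])
                = pvTok rest [] := by
              have hI := ih rest hr
              rw [hx] at hI
              simpa using hI
            rw [hrest, pvTok_cons₃ _ _ _ h1 h2,
                pvTok_modifyHead rest.length rest [c] le_rfl]
            simp only [show ∀ c : Char, ([c] : List Char).reverse = [c] from fun c => rfl]

theorem pvScanB_eq_map_tok : ∀ n l cur, l.length ≤ n →
    pvScanB l cur = (pvTok l cur).map
      (fun p => PySem.Str.stripChars (String.ofList p) "'") := by
  intro n
  induction n with
  | zero =>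
    intro l cur h; have : l = [] := by cases l <;> simp_all
    subst this; simp [pvScanB, pvTok]
  | succ n ih =>
    intro l cur h
    cases l with
    | nil => simp [pvScanB, pvTok]
    | cons c rest =>
      have hr : rest.length ≤ n := by simp at h; omega
      by_cases h1 : ("], [".toList).isPrefixOf (c :: rest) = true
      · rw [pvTok_cons₁ c rest cur h1]
        simp only [pvScanB]; rw [if_pos h1]
        have hlen : ((c :: rest).drop 4).length ≤ n := by
          simp only [List.length_drop]; simp at h ⊢; omega
        rw [ih _ [] hlen]; simp
      · by_cases h2 : ("', ".toList).isPrefixOf (c :: rest) = true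
        · rw [pvTok_cons₂ c rest cur h1 h2]
          simp only [pvScanB]; rw [if_neg h1, if_pos h2]
          have hlen : ((c :: rest).drop 3).length ≤ n := by
            simp only [List.length_drop]; simp at h ⊢; omega
          rw [ih _ [] hlen]; simp
        · rw [pvTok_cons₃ c rest cur h1 h2]
          simp only [pvScanB]; rw [if_neg h1, if_neg h2]
          exact ih rest (c :: cur) hr

theorem pvFoldl_app_map {α β : Type} (g : α → β) :
    ∀ (xs : List α) (init : List β),
      xs.foldl (fun r a => r ++ [g a]) init = init ++ xs.map g := by
  intro xs
  induction xs with
  | nil => simp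
  | cons a t ih => intro init; simp [List.foldl_cons, ih]

theorem pvFoldl_app_flat {α β : Type} (f : α → List β) :
    ∀ (xs : List α) (init : List β),
      xs.foldl (fun r a => r ++ f a) init = init ++ xs.flatMap f := by
  intro xs
  induction xs with
  | nil => simp
  | cons a t ih => intro init; simp [List.foldl_cons, ih]

theorem pvFlatMap_map {α β γ : Type} (f : β → List γ) (g : α → β) :
    ∀ ps : List α, (ps.map g).flatMap f = ps.flatMap (fun p => f (g p)) := by
  intro ps
  induction ps with
  | nil => simp
  | cons a t ih => simp [ih]

theorem pvMap_flatMap {α β γ : Type} (S : α → List β) (g : β → γ) :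
    ∀ ps : List α, ps.flatMap (fun p => (S p).map g) = (ps.flatMap S).map g := by
  intro ps
  induction ps with
  | nil => simp
  | cons a t ih => simp [ih]

theorem pvToList_ofList (p : List Char) : (String.ofList p).toList = p :=
  String.toList_ofList

theorem pvSplit?_getD (s : String) (sep : String) (hsep : sep.toList ≠ []) :
    (PySem.Str.split? s sep).getD []
      = (PySem.Chars.splitOn s.toList sep.toList).map String.ofList := by
  simp [PySem.Str.split?, PySem.Chars.split?, hsep]

-- ===== VERDICT (by name: the statement is the Claim_ definition above) =====
theorem split_reviews_spec : Claim_equal_split_reviews := by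
  unfold Claim_equal_split_reviews Spec_split_reviews
  intro x _
  simp only [split_reviews, split_reviews_alt]
  rw [pvSplit?_getD _ "], [" (by decide)]
  simp only [pvFoldl_app_map, pvFoldl_app_flat, List.nil_append]
  rw [pvFlatMap_map]
  have h4 : ∀ p : List Char,
      ((PySem.Str.split? (String.ofList p) "', ").getD []).map
          (fun x1 => PySem.Str.stripChars x1 "'")
        = (PySem.Chars.splitOn p ("', ".toList)).map
            (fun q => PySem.Str.stripChars (String.ofList q) "'") := by
    intro p
    rw [pvSplit?_getD _ "', " (by decide), pvToList_ofList, List.map_map]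
    rfl
  simp only [h4]
  have hin : ∀ p : List Char,
      PySem.Chars.splitOn p ("', ".toList) = pvSp ("', ".toList) p [] :=
    fun p => pvSplitOn_eq _ p (by decide)
  simp only [hin, pvMap_flatMap]
  rw [pvSplitOn_eq _ _ pvD1_ne, pvMain _ _ le_rfl,
      pvScanB_eq_map_tok _ _ [] le_rfl]
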